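-- pv_equiv track=rewrite | github.com/afnanenayet/daily-coding-problem | python3/solution_1833.py | solve_array
-- ===== SOURCE A (Python) =====
-- def solve_array(constraints: list[str | None]) -> list[int]:
--     """
--     Returns an array that satisfies the constraints by some input problem.
--
--     Args:
--         constraints: A list of constraints, either "+", "-", or `None`.
--           - "+" means that the element must be greater than the last number
--           - "-" means that the element must be less than the last number
--           - `None` means no constraint has been applied.
--
--           The first element must be `None`.
--
--     Returns:
--         Some array that satisfies the constraints.
--     """
--     res = [0 for _ in range(len(constraints))]
--     lower_idx = 0
--     upper_idx = len(constraints) - 1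
--
--     for i, c in reversed(list(enumerate(constraints))):
--         if c == "+":
--             res[i] = upper_idx
--             upper_idx -= 1
--         elif c == "-":
--             res[i] = lower_idx
--             lower_idx += 1
--         elif c is None:
--             res[i] = lower_idx
--         else:
--             raise ValueError(f"Unexpected element {c} in constraint array")
--     return res
-- ===== SOURCE B (Python) =====
-- def solve_array(constraints):
--     """Single left-to-right pass using total '+'/'-' counts instead of
--     A's reversed-index loop with two moving pointers."""
--     n = len(constraints)
--     total_plus = constraints.count("+")
--     total_minus = constraints.count("-")
--     res = []
--     seen_plus = 0
--     seen_minus = 0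
--     for c in constraints:
--         if c == "+":
--             seen_plus += 1
--             res.append(n - 1 - (total_plus - seen_plus))
--         elif c == "-":
--             seen_minus += 1
--             res.append(total_minus - seen_minus)
--         elif c is None:
--             res.append(total_minus - seen_minus)
--         else:
--             raise ValueError(f"Unexpected element {c} in constraint array")
--     return res
-- ===== Notes on version B (the rewrite author's own statement) =====
-- stated objective: alternative
-- what changed: A fills a preallocated array while scanning the reversed enumerated list with two moving pointers; B makes a single left-to-right pass that appends each value computed in closed form from the total '+'/'-' counts and the counts seen so far.
import Mathlib
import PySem

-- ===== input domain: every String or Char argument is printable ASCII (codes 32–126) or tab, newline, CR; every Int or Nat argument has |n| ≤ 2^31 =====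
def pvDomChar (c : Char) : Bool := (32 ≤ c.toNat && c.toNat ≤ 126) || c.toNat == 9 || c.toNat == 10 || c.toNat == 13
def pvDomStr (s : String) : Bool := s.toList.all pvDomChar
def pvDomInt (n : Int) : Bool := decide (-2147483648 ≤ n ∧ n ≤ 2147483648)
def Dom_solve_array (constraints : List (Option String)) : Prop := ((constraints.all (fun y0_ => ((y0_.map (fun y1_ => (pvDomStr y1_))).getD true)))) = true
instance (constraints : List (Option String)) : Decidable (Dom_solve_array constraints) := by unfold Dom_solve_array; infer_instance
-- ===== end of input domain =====

-- B replaces A's reversed-index loop with two moving pointers by a single forward pass that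
-- appends each value computed in closed form from total and already-seen '+'/'-' counts
-- (objective: alternative; same O(n) cost).

-- ===== PORT A =====
-- loop body of A's `for i, c in reversed(list(enumerate(constraints)))`; state = (res, lower_idx, upper_idx)
def stepA : (List Int × Int × Int) → (Int × Option String) → (List Int × Int × Int) :=
  fun st p =>
    match p.2 with
    | some s =>
      if s = "+" then (st.1.set p.1.toNat st.2.2, st.2.1, st.2.2 - 1)
      else if s = "-" then (st.1.set p.1.toNat st.2.1, st.2.1 + 1, st.2.2)
      else st  -- Python raises ValueError here; such inputs are excluded by Pre_solve_array
    | none => (st.1.set p.1.toNat st.2.1, st.2.1, st.2.2)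

def solve_array (constraints : List (Option String)) : List Int :=
  let n := constraints.length
  (((PySem.List.enumerate constraints).reverse).foldl stepA
    (List.replicate n (0 : Int), (0 : Int), (n : Int) - 1)).1

-- ===== PORT B =====
-- loop body of B's forward pass; state = (res, seen_plus, seen_minus)
def stepB (n totalPlus totalMinus : Int) : (List Int × Int × Int) → Option String → (List Int × Int × Int) :=
  fun st c =>
    match c with
    | some s =>
      if s = "+" then (st.1 ++ [n - 1 - (totalPlus - (st.2.1 + 1))], st.2.1 + 1, st.2.2)
      else if s = "-" then (st.1 ++ [totalMinus - (st.2.2 + 1)], st.2.1, st.2.2 + 1)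
      else st  -- Python raises ValueError here; such inputs are excluded by Pre_solve_array
    | none => (st.1 ++ [totalMinus - st.2.2], st.2.1, st.2.2)

def solve_array_alt (constraints : List (Option String)) : List Int :=
  let n : Int := constraints.length
  let totalPlus : Int := PySem.List.count constraints (some "+")
  let totalMinus : Int := PySem.List.count constraints (some "-")
  (constraints.foldl (stepB n totalPlus totalMinus) ([], 0, 0)).1

-- ===== PRECONDITION & SPEC =====
-- Pre_ excludes exactly the inputs containing an element other than "+", "-", None,
-- on which the Python A raises ValueError (B raises there too).
def Pre_solve_array (constraints : List (Option String)) : Prop :=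
  ∀ c ∈ constraints, c = some "+" ∨ c = some "-" ∨ c = none
instance (constraints : List (Option String)) : Decidable (Pre_solve_array constraints) := by
  unfold Pre_solve_array; infer_instance

def pvWitness_solve_array : List (Option String) := [none, some "+", some "-", some "+", none]

def Spec_solve_array (constraints : List (Option String)) (out : List Int) : Prop := out = solve_array_alt constraints
instance (constraints : List (Option String)) (out : List Int) : Decidable (Spec_solve_array constraints out) := by unfold Spec_solve_array; infer_instance

-- ===== CLAIM (what is proved, stated in full; the proofs are below) =====
def Claim_equal_solve_array : Prop := ∀ (constraints : List (Option String)), Dom_solve_array constraints → Pre_solve_array constraints → Spec_solve_array constraints (solve_array constraints)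

-- ===== LEMMAS AND PROOFS =====

-- the values A writes into res, read positionally: a '+' slot gets up minus the '+'-count of the
-- suffix to its right, a '-'/None slot gets lo plus the '-'-count of that suffix
def valsA : List (Option String) → Int → Int → List Int
  | [], _, _ => []
  | c :: rest, lo, up =>
    (match c with
     | some s => if s = "+" then up - (rest.count (some "+") : Int)
                 else lo + (rest.count (some "-") : Int)
     | none => lo + (rest.count (some "-") : Int)) :: valsA rest lo up

theorem length_valsA (l : List (Option String)) (lo up : Int) : (valsA l lo up).length = l.length := by
  induction l with
  | nil => rfl
  | cons c rest ih => simp [valsA, ih]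

-- overwrite res[k], res[k+1], … with vs, the position-k write performed last (as A's reversed loop does)
def ow : List Int → Nat → List Int → List Int
  | res, _, [] => res
  | res, k, v :: vs => (ow res (k+1) vs).set k v

theorem ow_spec (vs : List Int) : ∀ (res : List Int) (k : Nat), k + vs.length ≤ res.length →
    ow res k vs = res.take k ++ vs ++ res.drop (k + vs.length) := by
  induction vs with
  | nil => intro res k h; simp [ow]
  | cons v vs ih =>
    intro res k h
    have hk : k < res.length := by simp at h; omega
    rw [ow, ih res (k+1) (by simp at h ⊢; omega)]
    simp only [List.append_assoc]
    rw [List.set_append, if_pos (by simp [List.length_take]; omega)]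
    have hset : (res.take (k+1)).set k v = res.take k ++ [v] := by
      apply List.ext_getElem
      · simp; omega
      · intro i h1 h2
        simp only [List.getElem_set, List.getElem_take]
        rcases Nat.lt_or_ge i k with hik | hik
        · rw [if_neg (by omega)]
          rw [List.getElem_append_left (by simp [List.length_take]; omega)]
          simp [List.getElem_take]
        · have : i = k := by simp [List.length_set, List.length_take] at h1; omega
          subst this
          rw [if_pos rfl]
          rw [List.getElem_append_right (by simp [List.length_take])]
          simp [List.length_take]
    rw [hset]
    simp [List.append_assoc]
    congr 1
    omega

-- A's reversed enumerated fold, characterised: it overwrites slots k… with valsA and moves both pointers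
theorem foldrA (l : List (Option String)) : ∀ (k : Nat) (res : List Int) (lo up : Int),
    (∀ c ∈ l, c = some "+" ∨ c = some "-" ∨ c = none) →
    List.foldr (fun p st => stepA st p) (res, lo, up) (PySem.List.enumerate l (k : Int))
      = (ow res k (valsA l lo up), lo + (l.count (some "-") : Int), up - (l.count (some "+") : Int)) := by
  induction l with
  | nil => intro k res lo up _; simp [PySem.List.enumerate_nil, valsA, ow]
  | cons c rest ih =>
    intro k res lo up hv
    have hrest : ∀ x ∈ rest, x = some "+" ∨ x = some "-" ∨ x = none :=
      fun x hx => hv x (List.mem_cons_of_mem _ hx)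
    rw [PySem.List.enumerate_cons, List.foldr_cons]
    have hc : ((k : Int) + 1) = ((k + 1 : Nat) : Int) := by push_cast; ring
    rw [hc, ih (k+1) res lo up hrest]
    rcases hv c (List.mem_cons_self) with h | h | h <;> subst h <;>
      simp [stepA, valsA, ow] <;> omega

-- B's values, read positionally from the seen-counts state
def valsB (n TP TM : Int) : List (Option String) → Int → Int → List Int
  | [], _, _ => []
  | c :: rest, sp, sm =>
    match c with
    | some s =>
      if s = "+" then (n - 1 - (TP - (sp + 1))) :: valsB n TP TM rest (sp + 1) sm
      else if s = "-" then (TM - (sm + 1)) :: valsB n TP TM rest sp (sm + 1)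
      else valsB n TP TM rest sp sm
    | none => (TM - sm) :: valsB n TP TM rest sp sm

theorem foldB (n TP TM : Int) (l : List (Option String)) : ∀ (acc : List Int) (sp sm : Int),
    (∀ c ∈ l, c = some "+" ∨ c = some "-" ∨ c = none) →
    (l.foldl (stepB n TP TM) (acc, sp, sm)).1 = acc ++ valsB n TP TM l sp sm := by
  induction l with
  | nil => intro acc sp sm _; simp [valsB]
  | cons c rest ih =>
    intro acc sp sm hv
    have hrest : ∀ x ∈ rest, x = some "+" ∨ x = some "-" ∨ x = none :=
      fun x hx => hv x (List.mem_cons_of_mem _ hx)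
    rcases hv c (List.mem_cons_self) with h | h | h <;> subst h <;>
      simp [List.foldl_cons, stepB, valsB, ih _ _ _ hrest]

-- B's seen-counts values coincide with A's pointer values once totals are split into seen + suffix
theorem valsB_eq_valsA (n TP TM : Int) (l : List (Option String)) : ∀ (sp sm : Int),
    (∀ c ∈ l, c = some "+" ∨ c = some "-" ∨ c = none) →
    valsB n TP TM l sp sm
      = valsA l (TM - sm - (l.count (some "-") : Int)) (n - 1 - (TP - sp - (l.count (some "+") : Int))) := by
  induction l with
  | nil => intro sp sm _; simp [valsB, valsA]
  | cons c rest ih =>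
    intro sp sm hv
    have hrest : ∀ x ∈ rest, x = some "+" ∨ x = some "-" ∨ x = none :=
      fun x hx => hv x (List.mem_cons_of_mem _ hx)
    rcases hv c (List.mem_cons_self) with h | h | h <;> subst h <;>
      simp [valsB, valsA, ih _ _ hrest] <;>
      constructor <;> first | omega | (congr 1 <;> omega)

theorem solve_array_eq (constraints : List (Option String))
    (hpre : ∀ c ∈ constraints, c = some "+" ∨ c = some "-" ∨ c = none) :
    solve_array constraints = valsA constraints 0 ((constraints.length : Int) - 1) := by
  have hA := foldrA constraints 0 (List.replicate constraints.length (0:Int)) 0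
      ((constraints.length : Int) - 1) hpre
  simp only [Nat.cast_zero] at hA
  show (((PySem.List.enumerate constraints).reverse).foldl stepA
    (List.replicate constraints.length (0 : Int), (0 : Int), (constraints.length : Int) - 1)).1 = _
  rw [List.foldl_reverse, hA]
  simp only
  rw [ow_spec _ _ _ (by simp [length_valsA])]
  simp [length_valsA]

theorem alt_eq (constraints : List (Option String))
    (hpre : ∀ c ∈ constraints, c = some "+" ∨ c = some "-" ∨ c = none) :
    solve_array_alt constraints = valsA constraints 0 ((constraints.length : Int) - 1) := by
  show (constraints.foldl (stepB (constraints.length : Int) (PySem.List.count constraints (some "+"))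
      (PySem.List.count constraints (some "-"))) ([], 0, 0)).1 = _
  rw [foldB _ _ _ _ _ _ _ hpre]
  rw [valsB_eq_valsA _ _ _ _ _ _ hpre]
  simp [PySem.List.count_eq]

-- ===== VERDICT (by name: the statement is the Claim_ definition above) =====
theorem solve_array_spec : Claim_equal_solve_array := by
  intro constraints _ hpre
  unfold Spec_solve_array
  rw [solve_array_eq constraints hpre, alt_eq constraints hpre]
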